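-- pv_equiv track=rewrite | github.com/jamiekieranmartin/sokoban | mySokobanSolver.py | check_if_corner_cell
-- ===== SOURCE A (Python) =====
-- ACTIONS = {'Up': (0, -1), 'Left': (-1, 0), 'Down': (0, 1), 'Right': (1, 0)}
--
-- def check_if_corner_cell(walls, dst):
--     """
--     checks the warehouse and determines if the cell is surrounded by a corner
--
--     @param walls: list of walls in (x, y) format
--     @param dst: the (row, col) of the position to test
--
--     @return
--         True if two surroundings diagonally adjacent to each other are both walls, thus the dst is in a corner
--         False otherwise
--     """
--     # get a list of surroundings in (x, y) form
--     surroundings = list(ACTIONS.values())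
--     for i, (a_x, a_y) in enumerate(surroundings):
--         # gets the next cell diagonally adjacent, use of mod wraps the
--         # index around back to the start for the final test
--         next_corner_index = (i + 1) % len(surroundings)
--         (b_x, b_y) = surroundings[next_corner_index]
--
--         # if both are walls, as in is a corner, then return True
--         if (dst[1] + a_x, dst[0] + a_y) in walls and (dst[1] + b_x, dst[0] + b_y) in walls:
--             return True
--     return False
-- ===== SOURCE B (Python) =====
-- def check_if_corner_cell(walls, dst):
--     up = (dst[1], dst[0] - 1) in walls
--     down = (dst[1], dst[0] + 1) in walls
--     left = (dst[1] - 1, dst[0]) in walls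
--     right = (dst[1] + 1, dst[0]) in walls
--     return (up or down) and (left or right)
-- ===== Notes on version B (the rewrite author's own statement) =====
-- stated objective: simpler
-- what changed: Replaced the enumerate loop over ACTIONS with modular next-index pairing by four named neighbor membership tests combined in the closed boolean formula (up or down) and (left or right), which is equivalent because the loop's consecutive pairs are exactly the vertical-by-horizontal combinations.
import Mathlib
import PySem

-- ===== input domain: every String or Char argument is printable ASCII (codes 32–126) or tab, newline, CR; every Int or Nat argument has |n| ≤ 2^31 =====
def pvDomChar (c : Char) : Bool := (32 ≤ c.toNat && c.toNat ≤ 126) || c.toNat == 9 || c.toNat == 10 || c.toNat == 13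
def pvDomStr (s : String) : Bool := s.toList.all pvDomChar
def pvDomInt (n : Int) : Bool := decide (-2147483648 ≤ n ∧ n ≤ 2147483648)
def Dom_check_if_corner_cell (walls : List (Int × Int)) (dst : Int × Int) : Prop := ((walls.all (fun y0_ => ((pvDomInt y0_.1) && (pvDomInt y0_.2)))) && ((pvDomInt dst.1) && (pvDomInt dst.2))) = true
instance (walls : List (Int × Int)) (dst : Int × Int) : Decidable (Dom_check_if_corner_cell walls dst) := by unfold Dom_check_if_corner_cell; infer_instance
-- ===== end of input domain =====

-- B replaces A's enumerate loop with modular next-index pairing by a closed boolean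
-- combination of the four neighbor membership tests (simpler; same cost).

-- ===== PORT A =====
-- the for-loop over enumerate(surroundings) with early return True
def ciccLoop (walls : List (Int × Int)) (dst : Int × Int)
    (surroundings : List (Int × Int)) : List (Int × (Int × Int)) → Bool
  | [] => false
  | (i, (ax, ay)) :: rest =>
      match PySem.List.pyGet? surroundings (PySem.Int.mod (i + 1) surroundings.length) with
      | none => false  -- unreachable: the index is always in range
      | some (bx, b_y) =>
        if walls.contains (dst.2 + ax, dst.1 + ay) && walls.contains (dst.2 + bx, dst.1 + b_y) then
          true
        else ciccLoop walls dst surroundings rest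

def check_if_corner_cell (walls : List (Int × Int)) (dst : Int × Int) : Bool :=
  let surroundings : List (Int × Int) := [(0, -1), (-1, 0), (0, 1), (1, 0)]
  ciccLoop walls dst surroundings (PySem.List.enumerate surroundings)

-- ===== PORT B =====
def check_if_corner_cell_alt (walls : List (Int × Int)) (dst : Int × Int) : Bool :=
  let up := walls.contains (dst.2, dst.1 - 1)
  let down := walls.contains (dst.2, dst.1 + 1)
  let left := walls.contains (dst.2 - 1, dst.1)
  let right := walls.contains (dst.2 + 1, dst.1)
  (up || down) && (left || right)

-- ===== PRECONDITION & SPEC =====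
def Spec_check_if_corner_cell (walls : List (Int × Int)) (dst : Int × Int) (out : Bool) : Prop := out = check_if_corner_cell_alt walls dst
instance (walls : List (Int × Int)) (dst : Int × Int) (out : Bool) : Decidable (Spec_check_if_corner_cell walls dst out) := by unfold Spec_check_if_corner_cell; infer_instance

-- ===== CLAIM (what is proved, stated in full; the proofs are below) =====
def Claim_equal_check_if_corner_cell : Prop := ∀ (walls : List (Int × Int)) (dst : Int × Int), Dom_check_if_corner_cell walls dst → Spec_check_if_corner_cell walls dst (check_if_corner_cell walls dst)

-- ===== LEMMAS AND PROOFS =====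

-- ===== VERDICT (by name: the statement is the Claim_ definition above) =====
theorem check_if_corner_cell_spec : Claim_equal_check_if_corner_cell := by
  intro walls dst _
  unfold Spec_check_if_corner_cell check_if_corner_cell check_if_corner_cell_alt
  simp only [PySem.List.enumerate_cons, PySem.List.enumerate_nil]
  simp only [ciccLoop, List.length_cons, List.length_nil]
  norm_num [PySem.Int.mod_eq_emod_of_pos (show (0:Int) < 4 by norm_num), PySem.List.pyGet?,
    PySem.List.pyIdx?]
  by_cases hu : ((dst.2, dst.1 + -1) : Int × Int) ∈ walls <;>
  by_cases hd : ((dst.2, dst.1 + 1) : Int × Int) ∈ walls <;>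
  by_cases hl : ((dst.2 + -1, dst.1) : Int × Int) ∈ walls <;>
  by_cases hr : ((dst.2 + 1, dst.1) : Int × Int) ∈ walls <;>
    simp [hu, hd, hl, hr, Int.sub_eq_add_neg]
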